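-- pv_equiv track=rewrite | github.com/jiva-z/Programmers | 프로그래머스/0/181834. l로 만들기/l로 만들기.py | solution
-- ===== SOURCE A (Python) =====
-- def solution(myString):
--     answer = ''
--
--     for i, alpha in enumerate(myString):
--         if alpha < 'l':
--             answer += 'l'
--         else:
--             answer += alpha
--
--     return answer
-- ===== SOURCE B (Python) =====
-- _TABLE = {cp: ord('l') for cp in range(ord('l'))}
--
-- def solution(myString):
--     return myString.translate(_TABLE)
-- ===== Notes on version B (the rewrite author's own statement) =====
-- stated objective: faster
-- what changed: Replaces the per-character branch-and-concatenate loop with a precomputed translation table (every code point below the threshold maps to the threshold character) applied in one str.translate call.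
import Mathlib
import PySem

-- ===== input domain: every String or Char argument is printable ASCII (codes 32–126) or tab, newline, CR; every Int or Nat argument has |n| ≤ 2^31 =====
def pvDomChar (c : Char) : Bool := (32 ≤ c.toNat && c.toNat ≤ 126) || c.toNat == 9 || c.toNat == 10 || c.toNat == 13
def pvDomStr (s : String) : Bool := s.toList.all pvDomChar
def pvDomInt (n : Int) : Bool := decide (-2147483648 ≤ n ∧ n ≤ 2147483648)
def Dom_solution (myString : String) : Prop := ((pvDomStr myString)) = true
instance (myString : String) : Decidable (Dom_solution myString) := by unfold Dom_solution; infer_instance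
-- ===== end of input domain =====

-- B changes A's branch-and-concatenate loop into a precomputed translation table applied by mapping each character (idiomatic str.translate).

-- ===== PORT A =====
-- loop over enumerate(myString), appending 'l' or the char itself
def solution (myString : String) : String :=
  String.mk ((PySem.List.enumerate myString.toList).foldl
    (fun answer p => if p.2 < 'l' then answer ++ ['l'] else answer ++ [p.2]) [])

-- ===== PORT B =====
-- translation table: every code point below ord('l') = 108 maps to 108
def pvTable : PySem.Dict Nat Nat :=
  (PySem.List.pyRange 0 108 1).foldl (fun d cp => d.insert cp.toNat 108) PySem.Dict.empty

-- str.translate: each char is replaced by the table entry for its code point, if any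
def solution_alt (myString : String) : String :=
  String.mk (myString.toList.map (fun c =>
    match pvTable.get? c.toNat with
    | some n => Char.ofNat n
    | none => c))

-- ===== PRECONDITION & SPEC =====
def Spec_solution (myString : String) (out : String) : Prop := out = solution_alt myString
instance (myString : String) (out : String) : Decidable (Spec_solution myString out) := by unfold Spec_solution; infer_instance

-- ===== CLAIM (what is proved, stated in full; the proofs are below) =====
def Claim_equal_solution : Prop := ∀ (myString : String), Dom_solution myString → Spec_solution myString (solution myString)

-- ===== LEMMAS AND PROOFS =====

set_option maxRecDepth 4000 in
-- table lookup characterised on the domain's code points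
theorem pvTable_get (n : Nat) (h : n ≤ 126) :
    pvTable.get? n = if n < 108 then some 108 else none := by
  revert h; revert n; decide

theorem solution_loop (l : List Char) (s : Int) (acc : List Char) :
    (PySem.List.enumerate l s).foldl
      (fun answer p => if p.2 < 'l' then answer ++ ['l'] else answer ++ [p.2]) acc
    = acc ++ l.map (fun c => if c < 'l' then 'l' else c) := by
  induction l generalizing s acc with
  | nil => simp [PySem.List.enumerate_nil]
  | cons c t ih =>
    rw [PySem.List.enumerate_cons]
    simp only [List.foldl_cons, List.map_cons]
    rw [ih]
    by_cases h : c < 'l' <;> simp [h]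

-- Python '<' on characters compares code points; so does Lean's Char '<'
theorem charLt_iff (a b : Char) : a < b ↔ a.toNat < b.toNat := Iff.rfl

set_option maxRecDepth 4000 in
theorem solution_spec : Claim_equal_solution := by
  intro s hdom
  unfold Spec_solution solution solution_alt
  rw [solution_loop]
  simp only [List.nil_append]
  congr 1
  apply List.map_congr_left
  intro c hc
  have hd : pvDomChar c = true := by
    have := List.all_eq_true.mp hdom c hc
    exact this
  have hle : c.toNat ≤ 126 := by
    simp [pvDomChar] at hd
    omega
  rw [pvTable_get c.toNat hle]
  have hiff : c < 'l' ↔ c.toNat < 108 := by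
    rw [charLt_iff]
    exact Iff.rfl
  by_cases h : c.toNat < 108
  · rw [if_pos (hiff.mpr h), if_pos h]
  · rw [if_neg (fun hc => h (hiff.mp hc)), if_neg h]
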